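-- pv_equiv track=rewrite | github.com/maxberezov/competitive_programming | adventofcode/d16/16.2.py | find_valid_tickets
-- ===== SOURCE A (Python) =====
-- from typing import List, Dict, Tuple, Set
--
-- def check_constrain(constraints: Dict[str, Tuple[List[int], List[int]]], constraint: str, value: int) -> bool:
--     if constraints[constraint][0][0] <= value <= constraints[constraint][0][1] or constraints[constraint][1][
--         0] <= value <= constraints[constraint][1][1]:
--         return True
--     else:
--         return False
--
-- def check_all_constraints(constraints: Dict[str, Tuple[List[int], List[int]]], value: int) -> bool:
--     for constraint in constraints.keys():  # O(k)
--         if check_constrain(constraints, constraint, value):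
--             return True
--     return False
--
-- def find_valid_tickets(constraints: Dict[str, Tuple[List[int], List[int]]], tickets: List[List[int]]) -> List[
--     List[int]]:
--     """
--     Complexity is O(n*k^2 + n^2)
--
--     """
--
--     invalid_tickets = []
--
--     for idx, ticket in enumerate(tickets):  # O(n)
--         for field in ticket:  # O(k)
--             if not check_all_constraints(constraints, field):  # O(k)
--                 invalid_tickets.append(ticket)
--                 break
--
--     valid_tickets = [x for x in tickets if x not in invalid_tickets]  # O(n^2)
--     return valid_tickets
-- ===== SOURCE B (Python) =====
-- def find_valid_tickets(constraints, tickets):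
--     ranges = [(r[0], r[1]) for pair in constraints.values() for r in pair[:2]]
--     return [t for t in tickets
--             if all(any(lo <= f <= hi for (lo, hi) in ranges) for f in t)]
-- ===== Notes on version B (the rewrite author's own statement) =====
-- stated objective: faster
-- what changed: B flattens the constraints' two ranges each into one (lo,hi) table built once and returns tickets whose every field hits some range in a single positive filtering pass, instead of A's per-field dict re-scan, invalid-ticket accumulator and quadratic 'x not in invalid_tickets' exclusion pass.
-- outside the precondition, e.g. on find_valid_tickets({'a': ([], [])}, []): A returns [], B raises IndexError
import Mathlib
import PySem

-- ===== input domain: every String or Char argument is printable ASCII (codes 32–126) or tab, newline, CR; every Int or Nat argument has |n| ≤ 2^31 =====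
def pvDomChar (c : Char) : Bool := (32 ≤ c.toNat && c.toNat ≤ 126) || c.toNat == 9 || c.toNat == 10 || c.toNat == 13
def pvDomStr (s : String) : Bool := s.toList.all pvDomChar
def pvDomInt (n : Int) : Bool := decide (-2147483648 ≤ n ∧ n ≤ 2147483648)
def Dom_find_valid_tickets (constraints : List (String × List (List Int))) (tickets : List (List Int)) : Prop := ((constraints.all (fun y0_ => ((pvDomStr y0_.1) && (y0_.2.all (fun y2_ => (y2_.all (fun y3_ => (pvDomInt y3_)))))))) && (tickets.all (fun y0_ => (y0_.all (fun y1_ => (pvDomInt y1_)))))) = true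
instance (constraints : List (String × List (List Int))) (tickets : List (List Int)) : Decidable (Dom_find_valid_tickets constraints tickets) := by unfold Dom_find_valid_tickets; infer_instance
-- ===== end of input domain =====

-- B replaces A's invalid-ticket list and quadratic exclusion pass by a flattened range
-- table built once and a single positive filtering pass (objective: faster).

-- ===== PORT A =====
-- indexing is exact inside Pre_ (keys present via the dict, ranges have the accessed slots)
def check_constrain (constraints : List (String × List (List Int))) (constraint : String) (value : Int) : Bool :=
  let v := (constraints.lookup constraint).getD []
  let r0 := v.getD 0 []
  let r1 := v.getD 1 []
  decide ((r0.getD 0 0 ≤ value ∧ value ≤ r0.getD 1 0) ∨ (r1.getD 0 0 ≤ value ∧ value ≤ r1.getD 1 0))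

def check_all_constraints (constraints : List (String × List (List Int))) (value : Int) : Bool :=
  constraints.any (fun p => check_constrain constraints p.1 value)

def find_valid_tickets (constraints : List (String × List (List Int))) (tickets : List (List Int)) : List (List Int) :=
  let invalid_tickets :=
    tickets.foldl
      (fun acc ticket =>
        if ticket.any (fun field => ! check_all_constraints constraints field) then acc ++ [ticket]
        else acc)
      ([] : List (List Int))
  tickets.filter (fun x => ! invalid_tickets.contains x)

-- ===== PORT B =====
def find_valid_tickets_alt (constraints : List (String × List (List Int))) (tickets : List (List Int)) : List (List Int) :=
  let ranges := constraints.flatMap (fun p => (p.2.take 2).map (fun r => (r.getD 0 0, r.getD 1 0)))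
  tickets.filter (fun t => t.all (fun f => ranges.any (fun lh => decide (lh.1 ≤ f ∧ f ≤ lh.2))))

-- ===== PRECONDITION & SPEC =====
-- Pre_ restricts constraints to the shape A's declared type promises (a dict, so distinct
-- keys, each value two ranges with both bounds present; extra ranges/bounds are ignored
-- by both programs): outside that shape A raises IndexError whenever a field is checked
-- and returns a value only accidentally when no field ever reaches the malformed slot.
def Pre_find_valid_tickets (constraints : List (String × List (List Int))) (tickets : List (List Int)) : Prop :=
  (constraints.map Prod.fst).Nodup ∧
  ∀ p ∈ constraints, 2 ≤ p.2.length ∧ ∀ r ∈ p.2.take 2, 2 ≤ r.length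
instance (constraints : List (String × List (List Int))) (tickets : List (List Int)) : Decidable (Pre_find_valid_tickets constraints tickets) := by unfold Pre_find_valid_tickets; infer_instance

def pvWitness_find_valid_tickets : (List (String × List (List Int))) × List (List Int) :=
  ([("a", [[1, 3], [5, 7]]), ("b", [[10, 10], [20, 22]])], [[2, 10], [4, 4], [2, 2]])

def Spec_find_valid_tickets (constraints : List (String × List (List Int))) (tickets : List (List Int)) (out : List (List Int)) : Prop := out = find_valid_tickets_alt constraints tickets
instance (constraints : List (String × List (List Int))) (tickets : List (List Int)) (out : List (List Int)) : Decidable (Spec_find_valid_tickets constraints tickets out) := by unfold Spec_find_valid_tickets; infer_instance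

-- ===== CLAIM (what is proved, stated in full; the proofs are below) =====
def Claim_equal_find_valid_tickets : Prop := ∀ (constraints : List (String × List (List Int))) (tickets : List (List Int)), Dom_find_valid_tickets constraints tickets → Pre_find_valid_tickets constraints tickets → Spec_find_valid_tickets constraints tickets (find_valid_tickets constraints tickets)

-- ===== LEMMAS AND PROOFS =====

theorem pv_any_congr {a : Type} (l : List a) (p q : a → Bool)
    (h : ∀ x ∈ l, p x = q x) : l.any p = l.any q := by
  induction l with
  | nil => rfl
  | cons y l ih =>
    simp only [List.any_cons, h y (List.mem_cons_self), ih (fun x hx => h x (List.mem_cons_of_mem _ hx))]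

-- lookup in an assoc list with distinct keys finds the member's own value
theorem pv_lookup_eq (l : List (String × List (List Int))) (p : String × List (List Int))
    (hn : (l.map Prod.fst).Nodup) (hm : p ∈ l) : l.lookup p.1 = some p.2 := by
  obtain ⟨k, v⟩ := p
  induction l with
  | nil => cases hm
  | cons q l ih =>
    obtain ⟨k', v'⟩ := q
    simp only [List.map_cons, List.nodup_cons] at hn
    rcases List.mem_cons.mp hm with h | hm
    · obtain ⟨rfl, rfl⟩ := Prod.mk.injEq .. ▸ h
      simp [List.lookup]
    · have hne : (k == k') = false := by
        have : k ≠ k' := by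
          intro h
          exact hn.1 (h ▸ List.mem_map_of_mem hm)
        simpa using this
      simp only [List.lookup, hne]
      exact ih hn.2 hm

-- the good-field test of B agrees with A's constraint scan, inside Pre_
theorem pv_field_eq (constraints : List (String × List (List Int)))
    (hn : (constraints.map Prod.fst).Nodup)
    (hs : ∀ p ∈ constraints, 2 ≤ p.2.length ∧ ∀ r ∈ p.2.take 2, 2 ≤ r.length)
    (f : Int) :
    (constraints.flatMap (fun p => (p.2.take 2).map (fun r => (r.getD 0 0, r.getD 1 0)))).any
        (fun lh => decide (lh.1 ≤ f ∧ f ≤ lh.2))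
      = check_all_constraints constraints f := by
  unfold check_all_constraints
  rw [List.any_flatMap]
  apply pv_any_congr
  intro p hp
  have hlk := pv_lookup_eq constraints p hn hp
  obtain ⟨hlen, _⟩ := hs p hp
  obtain ⟨r0, r1, hv⟩ : ∃ r0 r1, p.2.take 2 = [r0, r1] := by
    match h : p.2, hlen with
    | r0 :: r1 :: _, _ => exact ⟨r0, r1, rfl⟩
  have h0 : p.2[0]? = some r0 := by
    have := congrArg (fun l => l[0]?) hv
    simpa [List.getElem?_take] using this
  have h1 : p.2[1]? = some r1 := by
    have := congrArg (fun l => l[1]?) hv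
    simpa [List.getElem?_take] using this
  simp [check_constrain, hlk, hv, h0, h1, Bool.or_comm]

-- membership in A's accumulated invalid list, characterised
theorem pv_invalid_mem (bad : List Int → Bool) (x : List Int) :
    ∀ (l acc : List (List Int)),
      (l.foldl (fun acc t => if bad t then acc ++ [t] else acc) acc).contains x
        = (acc.contains x || (l.contains x && bad x)) := by
  intro l
  induction l with
  | nil => simp
  | cons t l ih =>
    intro acc
    simp only [List.foldl_cons]
    rw [ih]
    by_cases hx : t = x
    · subst hx
      by_cases hb : bad t <;> simp [hb]
    · have hxt : ¬ x = t := fun h => hx h.symm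
      by_cases hb : bad t <;> simp [hb, List.mem_append, hxt]

-- ===== VERDICT (by name: the statement is the Claim_ definition above) =====
theorem find_valid_tickets_spec : Claim_equal_find_valid_tickets := by
  intro constraints tickets _ hpre
  obtain ⟨hn, hs⟩ := hpre
  unfold Spec_find_valid_tickets find_valid_tickets find_valid_tickets_alt
  apply List.filter_congr
  intro x hx
  rw [pv_invalid_mem]
  have hxmem : tickets.contains x = true := by simpa using hx
  simp only [List.contains_nil, Bool.false_or, hxmem, Bool.true_and]
  rw [List.all_eq_not_any_not]
  congr 1
  apply pv_any_congr
  intro f _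
  rw [pv_field_eq constraints hn hs f]
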